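-- pv_equiv track=rewrite | github.com/Kazun1998/library_for_python | Stern_Brocot_Tree.py | decode_interval
-- ===== SOURCE A (Python) =====
-- def decode_interval(code, left = 'L', right = 'R'):
--     p, q, r, s = 0, 1, 1, 0
--     for direction, k in code:
--         if direction == left:
--             r += k * p
--             s += k * q
--         elif direction == right:
--             p += k * r
--             q += k * s
--     return (p, q, r, s)
-- ===== SOURCE B (Python) =====
-- def _mul(A, B):
--     (a, b), (c, d) = A
--     (e, f), (g, h) = B
--     return ((a * e + b * g, a * f + b * h), (c * e + d * g, c * f + d * h))
--
-- def decode_interval(code, left='L', right='R'):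
--     factors = []
--     for direction, k in code:
--         if direction == left:
--             factors.append(((1, k), (0, 1)))
--         elif direction == right:
--             factors.append(((1, 0), (k, 1)))
--     M = ((0, 1), (1, 0))
--     for F in factors:
--         M = _mul(M, F)
--     return (M[0][0], M[1][0], M[0][1], M[1][1])
-- ===== Notes on version B (the rewrite author's own statement) =====
-- stated objective: alternative
-- what changed: Replaces the four-variable in-place update loop by a two-phase matrix formulation: first build the list of 2x2 factor matrices for the recognized directions, then fold a generic 2x2 matrix multiply over them from [[0,1],[1,0]].
import Mathlib
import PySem

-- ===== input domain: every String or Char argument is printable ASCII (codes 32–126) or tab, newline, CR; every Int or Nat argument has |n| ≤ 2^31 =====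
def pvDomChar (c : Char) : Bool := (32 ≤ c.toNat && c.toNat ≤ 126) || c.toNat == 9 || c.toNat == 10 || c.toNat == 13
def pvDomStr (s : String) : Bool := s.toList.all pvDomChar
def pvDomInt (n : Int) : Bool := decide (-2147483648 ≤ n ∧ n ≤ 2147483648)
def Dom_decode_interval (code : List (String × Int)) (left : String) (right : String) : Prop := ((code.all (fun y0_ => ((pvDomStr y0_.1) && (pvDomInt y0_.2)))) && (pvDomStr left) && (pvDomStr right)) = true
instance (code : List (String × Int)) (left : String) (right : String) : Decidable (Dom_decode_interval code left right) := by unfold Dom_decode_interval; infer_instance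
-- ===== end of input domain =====

-- B reformulates the state-update loop as a fold of a generic 2x2 matrix multiply over a
-- pre-built factor list (objective: alternative); same values, same cost.

-- ===== PORT A =====
def decode_interval (code : List (String × Int)) (left : String) (right : String) : Int × Int × Int × Int :=
  let st := code.foldl (fun (st : Int × Int × Int × Int) dk =>
    let (p, q, r, s) := st
    let (direction, k) := dk
    if direction == left then (p, q, r + k * p, s + k * q)
    else if direction == right then (p + k * r, q + k * s, r, s)
    else (p, q, r, s)) (0, 1, 1, 0)
  st

-- ===== PORT B =====
abbrev pvMat : Type := (Int × Int) × (Int × Int)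

def pvMul (A B : pvMat) : pvMat :=
  let ((a, b), (c, d)) := A
  let ((e, f), (g, h)) := B
  ((a * e + b * g, a * f + b * h), (c * e + d * g, c * f + d * h))

def decode_interval_alt (code : List (String × Int)) (left : String) (right : String) : Int × Int × Int × Int :=
  let factors : List pvMat := code.foldl (fun fs dk =>
    let (direction, k) := dk
    if direction == left then fs ++ [((1, k), (0, 1))]
    else if direction == right then fs ++ [((1, 0), (k, 1))]
    else fs) []
  let M : pvMat := factors.foldl pvMul ((0, 1), (1, 0))
  (M.1.1, M.2.1, M.1.2, M.2.2)

-- ===== PRECONDITION & SPEC =====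
def Spec_decode_interval (code : List (String × Int)) (left : String) (right : String) (out : Int × Int × Int × Int) : Prop := out = decode_interval_alt code left right
instance (code : List (String × Int)) (left : String) (right : String) (out : Int × Int × Int × Int) : Decidable (Spec_decode_interval code left right out) := by unfold Spec_decode_interval; infer_instance

-- ===== CLAIM (what is proved, stated in full; the proofs are below) =====
def Claim_equal_decode_interval : Prop := ∀ (code : List (String × Int)) (left : String) (right : String), Dom_decode_interval code left right → Spec_decode_interval code left right (decode_interval code left right)

-- ===== LEMMAS AND PROOFS =====

-- the factor matrix contributed by one code entry, if recognized
def pvFac (left right : String) (dk : String × Int) : Option pvMat :=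
  if dk.1 == left then some ((1, dk.2), (0, 1))
  else if dk.1 == right then some ((1, 0), (dk.2, 1))
  else none

theorem pv_factors_eq (left right : String) (code : List (String × Int)) :
    ∀ acc : List pvMat,
      code.foldl (fun fs dk =>
        let (direction, k) := dk
        if direction == left then fs ++ [((1, k), (0, 1))]
        else if direction == right then fs ++ [((1, 0), (k, 1))]
        else fs) acc = acc ++ code.filterMap (pvFac left right) := by
  induction code with
  | nil => intro acc; simp
  | cons hd tl ih =>
    intro acc
    rw [List.foldl_cons, ih]
    obtain ⟨d, k⟩ := hd
    simp only [pvFac, List.filterMap_cons]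
    by_cases h1 : d == left
    · simp [h1, List.append_assoc]
    · by_cases h2 : d == right
      · simp [h1, h2, List.append_assoc]
      · simp [h1, h2]

theorem pv_loop_eq (left right : String) (code : List (String × Int)) :
    ∀ M : pvMat,
      code.foldl (fun (st : Int × Int × Int × Int) dk =>
        let (p, q, r, s) := st
        let (direction, k) := dk
        if direction == left then (p, q, r + k * p, s + k * q)
        else if direction == right then (p + k * r, q + k * s, r, s)
        else (p, q, r, s)) (M.1.1, M.2.1, M.1.2, M.2.2)
      = (let N := (code.filterMap (pvFac left right)).foldl pvMul M
         (N.1.1, N.2.1, N.1.2, N.2.2)) := by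
  induction code with
  | nil => intro M; rfl
  | cons hd tl ih =>
    intro M
    obtain ⟨d, k⟩ := hd
    obtain ⟨⟨a, b⟩, ⟨c, e⟩⟩ := M
    rw [List.foldl_cons]
    simp only [List.filterMap_cons, pvFac]
    by_cases h1 : d == left
    · have hm : pvMul ((a, b), (c, e)) ((1, k), (0, 1)) = ((a, b + k * a), (c, e + k * c)) := by
        simp only [pvMul]; ring_nf
      simp only [h1, if_true]
      rw [List.foldl_cons, hm]
      exact ih ((a, b + k * a), (c, e + k * c))
    · by_cases h2 : d == right
      · have hm : pvMul ((a, b), (c, e)) ((1, 0), (k, 1)) = ((a + k * b, b), (c + k * e, e)) := by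
          simp only [pvMul]; ring_nf
        simp only [h1, h2, if_true, if_false, Bool.false_eq_true]
        rw [List.foldl_cons, hm]
        exact ih ((a + k * b, b), (c + k * e, e))
      · simp only [h1, h2, if_false, Bool.false_eq_true]
        exact ih ((a, b), (c, e))

-- ===== VERDICT (by name: the statement is the Claim_ definition above) =====
theorem decode_interval_spec : Claim_equal_decode_interval := by
  intro code left right _
  unfold Spec_decode_interval decode_interval decode_interval_alt
  rw [pv_factors_eq left right code []]
  simpa using pv_loop_eq left right code ((0, 1), (1, 0))
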